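-- pv_equiv track=rewrite | github.com/Atorami/study_labs.py | album_152749__lab4.py | post_line
-- ===== SOURCE A (Python) =====
-- from collections import deque
--
-- def post_line(arr):
--     que = deque()
--     que_arr = []
--
--     for i in arr:
--         que.append([i, False])
--
--     while que:
--         person = que.popleft()
--         if person[0][1] and not person[1]:
--             que.append([person[0], True])
--         else:
--             que_arr.append(person[0][0])
--     return que_arr
-- ===== SOURCE B (Python) =====
-- def post_line(arr):
--     return [p[0] for p in arr if not p[1]] + [p[0] for p in arr if p[1]]
-- ===== Notes on version B (the rewrite author's own statement) =====
-- stated objective: simpler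
-- what changed: Replaces the deque simulation with re-enqueueing of flagged entries by a direct stable partition: two comprehensions over arr (non-flagged ids in order, then flagged ids in order).
import Mathlib
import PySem

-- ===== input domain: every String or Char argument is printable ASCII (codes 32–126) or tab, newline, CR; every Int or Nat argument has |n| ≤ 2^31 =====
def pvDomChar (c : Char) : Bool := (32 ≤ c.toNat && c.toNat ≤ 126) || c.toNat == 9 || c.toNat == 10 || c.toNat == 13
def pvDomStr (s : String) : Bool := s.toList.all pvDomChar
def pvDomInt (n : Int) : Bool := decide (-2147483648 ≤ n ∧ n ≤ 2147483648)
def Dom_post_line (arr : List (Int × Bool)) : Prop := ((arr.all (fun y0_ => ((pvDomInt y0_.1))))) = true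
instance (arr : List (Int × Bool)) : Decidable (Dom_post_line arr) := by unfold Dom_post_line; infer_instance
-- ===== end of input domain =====

-- B replaces A's deque simulation (re-enqueue flagged entries) with a direct stable
-- two-pass partition; objective: simpler.

-- ===== PORT A =====
-- the while loop of A: queue entries are (person, deferred-flag) pairs
def post_line_loop (que : List ((Int × Bool) × Bool)) (que_arr : List Int) : List Int :=
  match que with
  | [] => que_arr
  | person :: rest =>
    if person.1.2 && !person.2 then
      post_line_loop (rest ++ [(person.1, true)]) que_arr
    else
      post_line_loop rest (que_arr ++ [person.1.1])
termination_by que.length + que.countP (fun p => !p.2)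
decreasing_by
  · simp only [List.length_append, List.countP_append, List.countP_cons, List.length_cons]
    rename_i hb
    simp only [Bool.and_eq_true] at hb
    simp [hb.2]
  · simp only [List.countP_cons, List.length_cons]
    split <;> omega

def post_line (arr : List (Int × Bool)) : List Int :=
  post_line_loop (arr.map (fun i => (i, false))) []

-- ===== PORT B =====
def post_line_alt (arr : List (Int × Bool)) : List Int :=
  (arr.filter (fun p => !p.2)).map Prod.fst ++ (arr.filter (fun p => p.2)).map Prod.fst

-- ===== PRECONDITION & SPEC =====
def Spec_post_line (arr : List (Int × Bool)) (out : List Int) : Prop := out = post_line_alt arr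
instance (arr : List (Int × Bool)) (out : List Int) : Decidable (Spec_post_line arr out) := by unfold Spec_post_line; infer_instance

-- ===== CLAIM (what is proved, stated in full; the proofs are below) =====
def Claim_equal_post_line : Prop := ∀ (arr : List (Int × Bool)), Dom_post_line arr → Spec_post_line arr (post_line arr)

-- ===== LEMMAS AND PROOFS =====

-- invariant of A's loop: fresh entries xs (deferred = false) followed by re-enqueued ys (deferred = true)
theorem post_line_loop_inv (xs ys : List (Int × Bool)) (acc : List Int) :
    post_line_loop (xs.map (fun i => (i, false)) ++ ys.map (fun i => (i, true))) acc
      = acc ++ (xs.filter (fun p => !p.2)).map Prod.fst ++ ys.map Prod.fst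
          ++ (xs.filter (fun p => p.2)).map Prod.fst := by
  induction xs generalizing ys acc with
  | nil =>
    induction ys generalizing acc with
    | nil => simp [post_line_loop]
    | cons y ys ih =>
      rw [List.map_nil, List.nil_append] at *
      rw [List.map_cons, post_line_loop]
      simp only [Bool.not_true, Bool.and_false]
      rw [ih]
      simp
  | cons x xs ih =>
    rw [List.map_cons, List.cons_append, post_line_loop]
    by_cases hx : x.2
    · simp only [hx, Bool.not_false, Bool.and_true, if_true]
      have : (xs.map (fun i => (i, false)) ++ ys.map (fun i => (i, true))) ++ [(x, true)]
            = xs.map (fun i => (i, false)) ++ (ys ++ [x]).map (fun i => (i, true)) := by simp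
      rw [this, ih]
      simp [hx]
    · simp only [Bool.not_eq_true] at hx
      simp only [hx, Bool.false_and]
      rw [ih]
      simp [hx]

-- ===== VERDICT (by name: the statement is the Claim_ definition above) =====
theorem post_line_spec : Claim_equal_post_line := by
  intro arr _
  unfold Spec_post_line post_line post_line_alt
  have := post_line_loop_inv arr [] []
  simpa using this
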